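-- pv_equiv track=rewrite | github.com/Happy-ryan/PS | 백준/Silver/1411. 비슷한 단어/비슷한 단어.py | check
-- ===== SOURCE A (Python) =====
-- def check(word):
--     dic = {}
--     for idx, w in enumerate(word):
--         if w not in dic:
--             dic[w] = str(idx)
--
--     ans = ''
--     for w in word:
--         ans += dic[w]
--
--     return ans
-- ===== SOURCE B (Python) =====
-- def check(word):
--     # Scatter-fill: for each character the first time it appears, stamp str(index)
--     # into every position holding that character; later occurrences are skipped.
--     out = [None] * len(word)
--     seen = set()
--     for i, c in enumerate(word):
--         if c not in seen:
--             seen.add(c)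
--             s = str(i)
--             out = [s if ch == c else o for ch, o in zip(word, out)]
--     return ''.join(out)
-- ===== Notes on version B (the rewrite author's own statement) =====
-- stated objective: alternative
-- what changed: B inverts the traversal: instead of A's per-position lookup in a first-occurrence table, B loops over the distinct characters (first occurrences only) and scatter-fills str(index) into all positions of that character in a pre-allocated output slot list, then joins the slots.
import Mathlib
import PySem

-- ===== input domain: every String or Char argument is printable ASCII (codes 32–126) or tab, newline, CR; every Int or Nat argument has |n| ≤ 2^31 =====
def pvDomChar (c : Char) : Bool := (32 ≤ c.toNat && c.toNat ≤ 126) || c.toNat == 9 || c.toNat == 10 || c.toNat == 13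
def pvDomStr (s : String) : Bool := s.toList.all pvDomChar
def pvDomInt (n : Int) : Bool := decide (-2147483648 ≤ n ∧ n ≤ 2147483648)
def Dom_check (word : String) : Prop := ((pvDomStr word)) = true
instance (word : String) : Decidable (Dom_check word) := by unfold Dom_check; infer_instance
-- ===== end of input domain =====

-- B replaces A's per-position table lookup by a scatter-fill over distinct characters (alternative traversal).


-- ===== PORT A =====
-- dict values are stored as List Char (str(idx)); dic[w] is getD with []: the key is always
-- present (every w of word was enumerated), so the default is never used.
def check (word : String) : String :=
  let ws := word.toList
  let dic := (PySem.List.enumerate ws 0).foldl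
      (fun d (p : Int × Char) =>
        if d.contains p.2 then d else d.insert p.2 (PySem.Int.toChars p.1))
      (PySem.Dict.empty : PySem.Dict Char (List Char))
  String.mk (ws.foldl (fun acc w => acc ++ dic.getD w []) ([] : List Char))

-- ===== PORT B =====
-- slot list out : List (Option (List Char)) (None → none); the zip-comprehension stamps str(i)
-- into every slot whose character equals c. By the final ''.join every slot is filled
-- (each position's character has been seen), so '.getD []' is never used.
def check_alt (word : String) : String :=
  let ws := word.toList
  let st := (PySem.List.enumerate ws 0).foldl
      (fun (st : PySem.Set Char × List (Option (List Char))) p =>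
        if PySem.Set.contains st.1 p.2 then st
        else
          let s := PySem.Int.toChars p.1
          (PySem.Set.add st.1 p.2,
           (ws.zip st.2).map (fun q => if q.1 = p.2 then some s else q.2)))
      ((PySem.Set.empty : PySem.Set Char), ws.map (fun _ => (none : Option (List Char))))
  String.mk ((st.2.map (fun o => o.getD [])).flatten)

-- ===== PRECONDITION & SPEC =====
def Spec_check (word : String) (out : String) : Prop := out = check_alt word
instance (word : String) (out : String) : Decidable (Spec_check word out) := by unfold Spec_check; infer_instance

-- ===== CLAIM (what is proved, stated in full; the proofs are below) =====
def Claim_equal_check : Prop := ∀ (word : String), Dom_check word → Spec_check word (check word)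

-- ===== LEMMAS AND PROOFS =====

-- str(first occurrence index of c in ws): the value both programs emit for each position of c
def firstIdxStr (ws : List Char) (c : Char) : List Char :=
  PySem.Int.toChars (((PySem.List.index? ws c).getD 0 : Nat) : Int)

-- A's loop body, abbreviated for the lemmas.
def dicStep (d : PySem.Dict Char (List Char)) (p : Int × Char) : PySem.Dict Char (List Char) :=
  if d.contains p.2 then d else d.insert p.2 (PySem.Int.toChars p.1)

-- B's loop body, abbreviated for the lemmas.
def stampStep (ws : List Char) (st : PySem.Set Char × List (Option (List Char)))
    (p : Int × Char) : PySem.Set Char × List (Option (List Char)) :=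
  if PySem.Set.contains st.1 p.2 then st
  else
    let s := PySem.Int.toChars p.1
    (PySem.Set.add st.1 p.2,
     (ws.zip st.2).map (fun q => if q.1 = p.2 then some s else q.2))

-- once a key is present, A's insert-if-absent loop never changes its value
theorem get?_foldl_dicStep_of_contains (l : List (Int × Char))
    (d : PySem.Dict Char (List Char)) (c : Char) (hc : d.contains c = true) :
    (l.foldl dicStep d).get? c = d.get? c := by
  induction l generalizing d with
  | nil => rfl
  | cons p t ih =>
    simp only [List.foldl_cons]
    by_cases hp : d.contains p.2
    · rw [dicStep, if_pos hp, ih d hc]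
    · have hne : c ≠ p.2 := by
        intro h; rw [h] at hc; simp [hc] at hp
      rw [dicStep, if_neg hp,
        ih _ (by rw [PySem.Dict.contains_insert]; simp [hc])]
      exact PySem.Dict.get?_insert_of_ne _ _ hne

-- the table built from enumerate ws s maps c (∈ ws, fresh in d) to str(s + first index of c in ws)
theorem getD_dic (ws : List Char) (s : Int) (d : PySem.Dict Char (List Char))
    (c : Char) (hmem : c ∈ ws) (hc : d.contains c = false) :
    ((PySem.List.enumerate ws s).foldl dicStep d).getD c []
      = PySem.Int.toChars (s + (((PySem.List.index? ws c).getD 0 : Nat) : Int)) := by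
  induction ws generalizing s d with
  | nil => cases hmem
  | cons a t ih =>
    rw [PySem.List.enumerate_cons, List.foldl_cons]
    by_cases hac : a = c
    · subst hac
      have hstep : dicStep d (s, a) = d.insert a (PySem.Int.toChars s) := by
        rw [dicStep, if_neg (by simp [hc])]
      rw [hstep, PySem.Dict.getD_eq_get?_getD,
        get?_foldl_dicStep_of_contains _ _ _ (PySem.Dict.contains_insert_self _ _ _),
        PySem.Dict.get?_insert_self, PySem.List.index?_cons_self]
      simp
    · have hct : c ∈ t := by cases hmem with
        | head => exact absurd rfl hac
        | tail _ h => exact h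
      have hca : c ≠ a := fun h => hac (Eq.symm h)
      have hd1 : (dicStep d (s, a)).contains c = false := by
        rw [dicStep]; by_cases hda : d.contains a
        · simp [hda, hc]
        · simp only [if_neg hda, PySem.Dict.contains_insert]
          simp [hc, hca]
      rw [ih (s + 1) _ hct hd1,
        PySem.List.index?_cons_of_ne t hac]
      obtain ⟨k, hk⟩ := (PySem.List.index?_isSome_iff (xs := t) (v := c)).2 hct
        |> Option.isSome_iff_exists.1
      rw [hk]
      simp only [Option.map_some, Option.getD_some]
      push_cast
      ring_nf

-- zipping ws with a map over ws and mapping the pairs is a single map over ws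
theorem zip_map_self_map {β γ : Type} (ws : List Char) (f : Char → β)
    (g : Char × β → γ) :
    ((ws.zip (ws.map f)).map g) = ws.map (fun c => g (c, f c)) := by
  induction ws with
  | nil => rfl
  | cons a t ih => simp only [List.map_cons, List.zip_cons_cons, ih]

-- B's loop invariant: with seen = the set of characters of pre and the slots filled exactly at
-- positions of seen characters, folding the remaining suffix fills the slots of its characters too.
theorem stamp_loop (ws : List Char) (t pre : List Char) (seen : PySem.Set Char)
    (hws : ws = pre ++ t)
    (hseen : ∀ c, PySem.Set.contains seen c = decide (c ∈ pre)) :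
    ((PySem.List.enumerate t (pre.length : Int)).foldl (stampStep ws)
        (seen, ws.map (fun c => if PySem.Set.contains seen c
            then some (firstIdxStr ws c) else none))).2
      = ws.map (fun c => if decide (c ∈ pre ++ t)
            then some (firstIdxStr ws c) else none) := by
  induction t generalizing pre seen with
  | nil =>
    simp only [PySem.List.enumerate_nil, List.foldl_nil, List.append_nil, hseen]
  | cons a t' ih =>
    rw [PySem.List.enumerate_cons, List.foldl_cons]
    by_cases h : PySem.Set.contains seen a = true
    · have ha : a ∈ pre := by have := hseen a; rw [h] at this; exact of_decide_eq_true this.symm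
      have hstep : stampStep ws
          (seen, ws.map (fun c => if PySem.Set.contains seen c
              then some (firstIdxStr ws c) else none)) ((pre.length : Int), a)
          = (seen, ws.map (fun c => if PySem.Set.contains seen c
              then some (firstIdxStr ws c) else none)) := by
        rw [stampStep, if_pos h]
      rw [hstep]
      have hlen : (pre.length : Int) + 1 = ((pre ++ [a]).length : Int) := by
        simp [List.length_append]
      have hseen' : ∀ c, PySem.Set.contains seen c = decide (c ∈ pre ++ [a]) := by
        intro c
        rw [hseen c]
        by_cases hca : c = a
        · subst hca; simp [ha]
        · simp [List.mem_append, hca]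
      rw [hlen]
      have := ih (pre ++ [a]) seen (by rw [hws, List.append_assoc]; rfl) hseen'
      simp only [hseen'] at this ⊢
      rw [this, List.append_assoc]
      rfl
    · have hb : PySem.Set.contains seen a = false := by simpa using h
      have ha : a ∉ pre := by
        have := hseen a; rw [hb] at this
        exact of_decide_eq_false this.symm
      have hidx : PySem.List.index? ws a = some pre.length :=
        (PySem.List.index?_eq_some_iff ws a pre.length).2 ⟨pre, t', hws, rfl, ha⟩
      have hF : firstIdxStr ws a = PySem.Int.toChars ((pre.length : Nat) : Int) := by
        rw [firstIdxStr, hidx]; rfl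
      have hstep : stampStep ws
          (seen, ws.map (fun c => if PySem.Set.contains seen c
              then some (firstIdxStr ws c) else none)) ((pre.length : Int), a)
          = (seen ++ [a], ws.map (fun c => if PySem.Set.contains (seen ++ [a]) c
              then some (firstIdxStr ws c) else none)) := by
        rw [stampStep, if_neg (by rw [hb]; simp)]
        simp only [PySem.Set.add, hb, Bool.false_eq_true, if_false]
        congr 1
        rw [zip_map_self_map]
        apply List.map_congr_left
        intro c _
        by_cases hca : c = a
        · subst hca
          simp [hF]
        · simp [hca]
      rw [hstep]
      have hseen' : ∀ c, PySem.Set.contains (seen ++ [a]) c = decide (c ∈ pre ++ [a]) := by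
        intro c
        by_cases hca : c = a
        · subst hca; simp [List.mem_append]
        · have hcp : c ∈ seen ↔ c ∈ pre := by simpa using hseen c
          simp [hca, List.mem_append, hcp]
      have hlen : (pre.length : Int) + 1 = ((pre ++ [a]).length : Int) := by
        simp [List.length_append]
      rw [hlen]
      have := ih (pre ++ [a]) (seen ++ [a]) (by rw [hws, List.append_assoc]; rfl) hseen'
      rw [this, List.append_assoc]
      rfl

-- ===== VERDICT (by name: the statement is the Claim_ definition above) =====
theorem check_spec : Claim_equal_check := by
  intro word _
  unfold Spec_check check check_alt
  simp only
  -- both sides equal String.mk (ws.flatMap (firstIdxStr ws))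
  congr 1
  -- A side
  rw [PySem.List.foldl_append_eq_flatMap]
  simp only [List.nil_append]
  rw [show (fun (d : PySem.Dict Char (List Char)) (p : Int × Char) =>
      if d.contains p.2 then d else d.insert p.2 (PySem.Int.toChars p.1)) = dicStep from rfl]
  have hA : word.toList.flatMap
      (fun w => ((PySem.List.enumerate word.toList 0).foldl dicStep PySem.Dict.empty).getD w [])
      = word.toList.flatMap (firstIdxStr word.toList) := by
    apply List.flatMap_congr
    intro c hc
    rw [getD_dic word.toList 0 PySem.Dict.empty c hc (PySem.Dict.contains_empty c)]
    rw [firstIdxStr]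
    ring_nf
  rw [hA]
  -- B side
  rw [show (fun (st : PySem.Set Char × List (Option (List Char))) (p : Int × Char) =>
      if PySem.Set.contains st.1 p.2 then st
      else
        let s := PySem.Int.toChars p.1
        (PySem.Set.add st.1 p.2,
         (word.toList.zip st.2).map (fun q => if q.1 = p.2 then some s else q.2)))
      = stampStep word.toList from rfl]
  have hinit : word.toList.map (fun _ => (none : Option (List Char)))
      = word.toList.map (fun c => if PySem.Set.contains (PySem.Set.empty : PySem.Set Char) c
          then some (firstIdxStr word.toList c) else none) := by
    simp [PySem.Set.empty]
  rw [hinit,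
    show ((0 : Int)) = ((([] : List Char).length : Nat) : Int) from rfl,
    stamp_loop word.toList word.toList [] PySem.Set.empty rfl (by simp [PySem.Set.empty])]
  simp only [List.nil_append, List.map_map]
  rw [List.flatMap_def]
  congr 1
  apply List.map_congr_left
  intro c hc
  simp [hc, firstIdxStr]
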